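-- pv_equiv track=rewrite | github.com/dgoldman0/graphnumbers | reboot/canonstar.py | edge_list
-- ===== SOURCE A (Python) =====
-- from typing import Dict, Iterable, List, Optional, Sequence, Tuple
--
-- def edge_list(bitrows: Sequence[int]) -> List[Tuple[int, int]]:
--     n = len(bitrows)
--     edges: List[Tuple[int, int]] = []
--     for u in range(n):
--         x = bitrows[u] >> (u + 1)
--         base = u + 1
--         while x:
--             lsb = x & -x
--             j = lsb.bit_length() - 1
--             x -= lsb
--             v = base + j
--             edges.append((u, v))
--     return edges
-- ===== SOURCE B (Python) =====
-- from typing import List, Sequence, Tuple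
--
-- def edge_list(bitrows: Sequence[int]) -> List[Tuple[int, int]]:
--     return [(u, v)
--             for u, row in enumerate(bitrows)
--             for v in range(u + 1, row.bit_length())
--             if (row >> v) & 1]
-- ===== Notes on version B (the rewrite author's own statement) =====
-- stated objective: idiomatic
-- what changed: A pops the lowest set bit of x = row >> (u+1) with lsb = x & -x and bit_length arithmetic in a while-loop; B is a single comprehension that scans bit positions v in range(u+1, row.bit_length()) and tests (row >> v) & 1.
-- outside the precondition, e.g. on edge_list([-1]): A does not finish within the time limit, B returns []
import Mathlib
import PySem

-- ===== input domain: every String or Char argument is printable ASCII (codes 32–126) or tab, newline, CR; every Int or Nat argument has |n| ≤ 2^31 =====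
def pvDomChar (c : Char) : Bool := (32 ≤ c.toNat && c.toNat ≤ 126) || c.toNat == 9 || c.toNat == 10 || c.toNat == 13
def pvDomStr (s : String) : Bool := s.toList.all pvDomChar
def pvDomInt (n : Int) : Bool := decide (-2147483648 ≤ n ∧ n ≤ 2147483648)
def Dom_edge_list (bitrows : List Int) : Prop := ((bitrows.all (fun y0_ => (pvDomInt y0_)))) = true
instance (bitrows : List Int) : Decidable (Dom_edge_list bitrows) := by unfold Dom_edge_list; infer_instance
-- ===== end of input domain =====

-- B replaces A's pop-lowest-set-bit while-loop by a comprehension scanning bit positions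
-- v in range(u+1, row.bit_length()) (objective: idiomatic); equality proved on Pre_
-- (all rows nonnegative; on a negative row A's while-loop never terminates).

-- ===== PORT A =====

-- lsb = x & -x satisfies 0 < lsb ≤ x for x > 0 (cited by pvPop's decreasing_by)
theorem pv_lsb_pos_le (x : Int) (hx : 0 < x) :
    0 < PySem.Int.band x (-x) ∧ PySem.Int.band x (-x) ≤ x := by
  rw [PySem.Int.band]
  rw [if_pos (show (0:Int) ≤ x by omega), if_neg (show ¬((0:Int) ≤ -x) by omega)]
  have h2 : x.toNat &&& (-(-x) - 1).toNat ≤ (-(-x) - 1).toNat := Nat.and_le_right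
  omega

-- A's inner `while x:` loop. Python's condition is `x != 0`; for x < 0 that loop never
-- terminates (x stays negative), so `0 < x` is a totality guard, exact on Pre_.
def pvPop (u base x : Int) : List (Int × Int) :=
  if h : 0 < x then
    let lsb := PySem.Int.band x (-x)          -- lsb = x & -x
    let j : Nat := PySem.Int.bitLength lsb - 1 -- j = lsb.bit_length() - 1
    (u, base + (j : Int)) :: pvPop u base (x - lsb)
  else []
termination_by x.toNat
decreasing_by
  have h2 := pv_lsb_pos_le x h
  omega

def edge_list (bitrows : List Int) : List (Int × Int) :=
  (List.range bitrows.length).foldl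
    (fun edges u =>
      let x := (bitrows.getD u 0) >>> (u + 1)  -- bitrows[u] >> (u+1); u < len, default unused
      let base : Int := (u : Int) + 1
      edges ++ pvPop (u : Int) base x)          -- the while loop appends to edges
    []

-- ===== PORT B =====
-- [(u, v) for u, row in enumerate(bitrows) for v in range(u+1, row.bit_length()) if (row >> v) & 1]
-- range(a, b) with 0 ≤ a ≤ b ports to List.range' a (b - a); (row >> v) & 1 is 0 or 1, so
-- Python's truthiness test is `= 1`.
def edge_list_alt (bitrows : List Int) : List (Int × Int) :=
  bitrows.zipIdx.flatMap (fun (p : Int × Nat) =>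
    (List.range' (p.2 + 1) (PySem.Int.bitLength p.1 - (p.2 + 1))).filterMap (fun (v : Nat) =>
      if PySem.Int.band (p.1 >>> v) 1 = 1 then some ((p.2 : Int), (v : Int)) else none))

-- ===== PRECONDITION & SPEC =====
-- Pre_ excludes lists containing a negative row: there A's `while x:` loop runs forever
-- (x stays negative), so A never returns on those inputs.
def Pre_edge_list (bitrows : List Int) : Prop := ∀ x ∈ bitrows, 0 ≤ x
instance (bitrows : List Int) : Decidable (Pre_edge_list bitrows) := by unfold Pre_edge_list; infer_instance
def pvWitness_edge_list : List Int := [6, 5, 3]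

def Spec_edge_list (bitrows : List Int) (out : List (Int × Int)) : Prop := out = edge_list_alt bitrows
instance (bitrows : List Int) (out : List (Int × Int)) : Decidable (Spec_edge_list bitrows out) := by unfold Spec_edge_list; infer_instance

-- ===== CLAIM (what is proved, stated in full; the proofs are below) =====
def Claim_equal_edge_list : Prop := ∀ (bitrows : List Int), Dom_edge_list bitrows → Pre_edge_list bitrows → Spec_edge_list bitrows (edge_list bitrows)

-- ===== LEMMAS AND PROOFS =====

-- x & -x on a positive natural, as a Nat expression
theorem pv_band_neg_natCast (m : Nat) (hm : 0 < m) :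
    PySem.Int.band (m : Int) (-(m : Int)) = ((m - (m &&& (m - 1)) : Nat) : Int) := by
  rw [PySem.Int.band]
  have h1 : ¬ (0 ≤ -(m : Int)) := by omega
  simp [h1, Int.toNat_natCast]
  omega

theorem pv_land_pred_odd (m : Nat) (hm : m % 2 = 1) : m &&& (m - 1) = m - 1 := by
  apply Nat.eq_of_testBit_eq
  intro i
  rw [Nat.testBit_land]
  cases i with
  | zero => simp [Nat.testBit_zero]; omega
  | succ i =>
    rw [Nat.testBit_add_one, Nat.testBit_add_one]
    have : m / 2 = (m - 1) / 2 := by omega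
    rw [this, Bool.and_self]

theorem pv_land_pred_even (k : Nat) (hk : 0 < k) :
    (2 * k) &&& (2 * k - 1) = 2 * (k &&& (k - 1)) := by
  apply Nat.eq_of_testBit_eq
  intro i
  rw [Nat.testBit_land]
  cases i with
  | zero =>
    simp only [Nat.testBit_zero]
    have : 2 * k % 2 = 0 := by omega
    have h2 : 2 * (k &&& (k - 1)) % 2 = 0 := by omega
    simp [this, h2]
  | succ i =>
    rw [Nat.testBit_add_one, Nat.testBit_add_one, Nat.testBit_add_one]
    have h1 : 2 * k / 2 = k := by omega
    have h2 : (2 * k - 1) / 2 = k - 1 := by omega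
    have h3 : 2 * (k &&& (k - 1)) / 2 = k &&& (k - 1) := by omega
    rw [h1, h2, h3, Nat.testBit_land]

-- reference form of one row's inner loop: emit (u, b+j) for every set bit j, low to high
def pvRef (u : Int) (b : Nat) (m : Nat) : List (Int × Int) :=
  if m = 0 then []
  else (if m % 2 = 1 then [(u, (b : Int))] else []) ++ pvRef u (b + 1) (m / 2)
termination_by m
decreasing_by exact Nat.div_lt_self (by omega) (by omega)

theorem pvRef_eq (u : Int) (b m : Nat) : pvRef u b m =
    if m = 0 then [] else (if m % 2 = 1 then [(u, (b : Int))] else []) ++ pvRef u (b + 1) (m / 2) := by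
  rw [pvRef]

theorem pv_bitLength_two_mul (l : Nat) (hl : 0 < l) :
    PySem.Int.bitLength ((2 * l : Nat) : Int) = PySem.Int.bitLength (l : Int) + 1 := by
  have h := PySem.Int.bitLength_natCast (m := 2 * l) (by omega)
  rwa [show 2 * l / 2 = l by omega] at h

theorem pv_bitLength_pos (m : Nat) (hm : 0 < m) : 0 < PySem.Int.bitLength (m : Int) := by
  rw [PySem.Int.bitLength_natCast hm]; omega

theorem pvPop_even (k : Nat) (u base : Int) :
    pvPop u base ((2 * k : Nat) : Int) = pvPop u (base + 1) (k : Int) := by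
  induction k using Nat.strong_induction_on generalizing base with
  | _ k IH =>
    by_cases hk : k = 0
    · subst hk; rw [pvPop, pvPop]; norm_num
    · have hk0 : 0 < k := by omega
      have hland : k &&& (k - 1) ≤ k - 1 := Nat.and_le_right
      set l := k - (k &&& (k - 1)) with hl
      have hlpos : 0 < l := by omega
      rw [pvPop, pvPop]
      have hx1 : (0:Int) < ((2 * k : Nat) : Int) := by positivity
      have hx2 : (0:Int) < ((k : Nat) : Int) := by exact_mod_cast hk0
      rw [dif_pos hx1, dif_pos hx2]
      have hb1 : PySem.Int.band ((2*k:Nat):Int) (-((2*k:Nat):Int)) = ((2*l : Nat) : Int) := by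
        rw [pv_band_neg_natCast _ (by omega), pv_land_pred_even k hk0]
        congr 1; omega
      have hb2 : PySem.Int.band ((k:Nat):Int) (-((k:Nat):Int)) = ((l : Nat) : Int) := by
        rw [pv_band_neg_natCast _ hk0]
      simp only [hb1, hb2]
      have hblpos := pv_bitLength_pos l hlpos
      have hbl : PySem.Int.bitLength ((2*l:Nat):Int) = PySem.Int.bitLength ((l:Nat):Int) + 1 :=
        pv_bitLength_two_mul l hlpos
      have e1 : (PySem.Int.bitLength ((2*l:Nat):Int) - 1 : Nat)
          = (PySem.Int.bitLength ((l:Nat):Int) - 1) + 1 := by omega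
      have e2 : ((2*k:Nat):Int) - ((2*l:Nat):Int) = ((2*(k-l):Nat):Int) := by push_cast; omega
      have e3 : ((k:Nat):Int) - ((l:Nat):Int) = ((k-l:Nat):Int) := by push_cast; omega
      rw [e1, e2, e3, IH (k - l) (by omega)]
      congr 2
      push_cast; ring

theorem pvPop_ref (m : Nat) (u : Int) (b : Nat) :
    pvPop u (b : Int) (m : Int) = pvRef u b m := by
  induction m using Nat.strong_induction_on generalizing b with
  | _ m IH =>
    by_cases hm : m = 0
    · subst hm; rw [pvPop, pvRef]; norm_num
    · have hm0 : 0 < m := by omega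
      have e3 : ((b:Nat):Int) + 1 = (((b+1:Nat)):Int) := by push_cast; ring
      by_cases hpar : m % 2 = 1
      · rw [pvPop, pvRef, dif_pos (by exact_mod_cast hm0 : (0:Int) < (m:Int)), if_neg hm]
        have hb1 : PySem.Int.band ((m:Nat):Int) (-((m:Nat):Int)) = ((1:Nat):Int) := by
          rw [pv_band_neg_natCast _ hm0, pv_land_pred_odd m hpar]
          congr 1; omega
        simp only [hb1, hpar, if_pos]
        have hbl1 : PySem.Int.bitLength ((1:Nat):Int) = 1 := by decide
        rw [hbl1]
        have e2 : ((m:Nat):Int) - ((1:Nat):Int) = ((2 * (m / 2) : Nat) : Int) := by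
          push_cast; omega
        rw [e2, pvPop_even (m / 2) u ((b:Nat):Int)]
        rw [e3, IH (m / 2) (by omega)]
        simp
      · rw [pvRef, if_neg hm]
        have hmeq : ((m:Nat):Int) = ((2 * (m / 2) : Nat) : Int) := by push_cast; omega
        rw [hmeq, pvPop_even (m / 2) u ((b:Nat):Int)]
        rw [e3, IH (m / 2) (by omega)]
        simp [hpar]

theorem pv_bitLength_shift (k r : Nat) :
    PySem.Int.bitLength ((r >>> k : Nat) : Int) = PySem.Int.bitLength (r : Int) - k := by
  induction k generalizing r with
  | zero => simp [Nat.shiftRight_zero]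
  | succ k IH =>
    have h1 : r >>> (k + 1) = (r / 2) >>> k := by
      rw [Nat.add_comm k 1, Nat.shiftRight_add, Nat.shiftRight_one]
    rw [h1, IH]
    by_cases hr : r = 0
    · subst hr; simp
    · rw [PySem.Int.bitLength_natCast (by omega : 0 < r)]
      omega

theorem pv_bitLength_eq_zero (m : Nat) (h : PySem.Int.bitLength (m : Int) = 0) : m = 0 := by
  by_contra hm
  have h2 := PySem.Int.bitLength_natCast (m := m) (by omega)
  rw [h] at h2
  omega

theorem pv_scan_ref (L : Nat) : ∀ (m : Nat) (u : Int) (b : Nat),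
    PySem.Int.bitLength (m : Int) = L →
    (List.range' b L).filterMap (fun v =>
        if (m >>> (v - b)) % 2 = 1 then some (u, (v : Int)) else none) = pvRef u b m := by
  induction L with
  | zero =>
    intro m u b hL
    rw [pv_bitLength_eq_zero m hL, pvRef]
    simp
  | succ L IH =>
    intro m u b hL
    have hm0 : 0 < m := by
      by_contra h
      have : m = 0 := by omega
      subst this
      simp at hL
    have htail : (List.range' (b+1) L).filterMap (fun v =>
        if (m >>> (v - b)) % 2 = 1 then some (u, (v : Int)) else none)
        = (List.range' (b+1) L).filterMap (fun v =>
        if ((m / 2) >>> (v - (b+1))) % 2 = 1 then some (u, (v : Int)) else none) := by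
      apply List.filterMap_congr
      intro v hv
      rcases List.mem_range'.mp hv with ⟨i, hi, rfl⟩
      have hvb : (b + 1 + 1 * i) - b = ((b + 1 + 1 * i) - (b+1)) + 1 := by omega
      rw [hvb, Nat.add_comm _ 1, Nat.shiftRight_add, Nat.shiftRight_one]
    have hL2 : PySem.Int.bitLength ((m / 2 : Nat) : Int) = L := by
      have h2 := PySem.Int.bitLength_natCast (m := m) hm0
      rw [hL] at h2
      omega
    rw [List.range'_succ, List.filterMap_cons, htail, IH (m / 2) u (b + 1) hL2]
    simp only [Nat.sub_self, Nat.shiftRight_zero]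
    rw [pvRef_eq u b m, if_neg (show ¬(m = 0) by omega)]
    by_cases hpar : m % 2 = 1
    · rw [if_pos hpar, if_pos hpar]
      rfl
    · rw [if_neg hpar, if_neg hpar]
      rfl

-- one row: A's inner loop = B's inner comprehension, for row ≥ 0
theorem pv_row_eq (row : Int) (hrow : 0 ≤ row) (u : Nat) :
    pvPop (u : Int) ((u : Int) + 1) (row >>> (u + 1)) =
      (List.range' (u + 1) (PySem.Int.bitLength row - (u + 1))).filterMap (fun (v : Nat) =>
        if PySem.Int.band (row >>> v) 1 = 1 then some ((u : Int), (v : Int)) else none) := by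
  obtain ⟨r, rfl⟩ : ∃ r : Nat, row = (r : Int) := ⟨row.toNat, by omega⟩
  have hsh : ∀ k : Nat, ((r : Int) >>> k) = ((r >>> k : Nat) : Int) := fun k => by
    exact_mod_cast Int.natCast_shiftRight r k
  have hbase : ((u : Int) + 1) = (((u + 1 : Nat)) : Int) := by push_cast; ring
  rw [hsh, hbase, pvPop_ref]
  have hcong : ∀ v ∈ List.range' (u + 1) (PySem.Int.bitLength (r : Int) - (u + 1)),
      (if PySem.Int.band ((r : Int) >>> v) 1 = 1 then some ((u : Int), (v : Int)) else none)
        = (if ((r >>> (u + 1)) >>> (v - (u + 1))) % 2 = 1 then some ((u : Int), (v : Int)) else none) := by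
    intro v hv
    rcases List.mem_range'.mp hv with ⟨i, hi, rfl⟩
    have hvsplit : (r >>> (u + 1)) >>> ((u + 1 + 1 * i) - (u + 1)) = r >>> (u + 1 + 1 * i) := by
      rw [← Nat.shiftRight_add]
      congr 1
      omega
    rw [hvsplit, hsh]
    have hb : PySem.Int.band (((r >>> (u + 1 + 1 * i) : Nat)) : Int) 1
        = (((r >>> (u + 1 + 1 * i)) % 2 : Nat) : Int) := by
      have := PySem.Int.band_natCast (r >>> (u + 1 + 1 * i)) 1
      rw [Nat.and_one_is_mod] at this
      exact_mod_cast this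
    rw [hb]
    apply if_congr _ rfl rfl
    exact_mod_cast Iff.rfl
  rw [List.filterMap_congr hcong]
  exact (pv_scan_ref _ (r >>> (u + 1)) (u : Int) (u + 1) (pv_bitLength_shift (u + 1) r)).symm

theorem pv_flatMap_congr {α β : Type} (l : List α) (f g : α → List β)
    (h : ∀ a ∈ l, f a = g a) : l.flatMap f = l.flatMap g := by
  induction l with
  | nil => rfl
  | cons a t IH =>
    rw [List.flatMap_cons, List.flatMap_cons, h a (by simp),
      IH (fun b hb => h b (by simp [hb]))]

theorem pv_flatMap_range_zipIdx {β : Type} (rows : List Int) (f : Int → Nat → List β) :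
    ∀ (k : Nat),
      (List.range rows.length).flatMap (fun u => f (rows.getD u 0) (u + k)) =
        (rows.zipIdx k).flatMap (fun p => f p.1 p.2) := by
  induction rows with
  | nil => intro k; rfl
  | cons r rs IH =>
    intro k
    rw [List.length_cons, List.range_succ_eq_map, List.flatMap_cons, List.flatMap_map,
      List.zipIdx_cons, List.flatMap_cons]
    simp only [List.getD_cons_zero, Nat.zero_add]
    congr 1
    have := IH (k + 1)
    calc (List.range rs.length).flatMap (fun u => f ((r :: rs).getD u.succ 0) (u.succ + k))
        = (List.range rs.length).flatMap (fun u => f (rs.getD u 0) (u + (k + 1))) := by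
          apply pv_flatMap_congr
          intro u hu
          rw [List.getD_cons_succ]
          congr 1
          omega
      _ = (rs.zipIdx (k + 1)).flatMap (fun p => f p.1 p.2) := IH (k + 1)

-- ===== VERDICT (by name: the statement is the Claim_ definition above) =====
theorem edge_list_spec : Claim_equal_edge_list := by
  intro bitrows _hDom hPre
  show edge_list bitrows = edge_list_alt bitrows
  rw [edge_list, edge_list_alt, PySem.List.foldl_append_eq_flatMap, List.nil_append]
  rw [pv_flatMap_congr (List.range bitrows.length) _
    (fun u => (List.range' (u + 1) (PySem.Int.bitLength (bitrows.getD u 0) - (u + 1))).filterMap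
      (fun (v : Nat) => if PySem.Int.band ((bitrows.getD u 0) >>> v) 1 = 1
        then some ((u : Int), (v : Int)) else none))
    (fun u hu => pv_row_eq (bitrows.getD u 0)
      (hPre _ (by
        have hu' : u < bitrows.length := List.mem_range.mp hu
        rw [List.getD_eq_getElem bitrows 0 hu']
        exact List.getElem_mem hu')) u)]
  have h := pv_flatMap_range_zipIdx bitrows
    (fun row ug => (List.range' (ug + 1) (PySem.Int.bitLength row - (ug + 1))).filterMap
      (fun (v : Nat) => if PySem.Int.band (row >>> v) 1 = 1 then some ((ug : Int), (v : Int)) else none)) 0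
  simpa using h
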